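-- pv_equiv track=rewrite | github.com/ASFHyP3/VolcSARvatory | volcsarvatory/prepare_multibursts.py | split_vertical_multiburst
-- ===== SOURCE A (Python) =====
-- def split_vertical_multiburst(multiburst_dict):
--     """
--     Splits a multiburst vertically if it finds a vertical gap in the set.
--
--     Args:
--         multiburst_dict: Dictionary where the keys are burst IDs and the elements are the swaths.
--
--     Returns:
--         new_sets: List of the splitted dictionary.
--     """
--     ids = [bid for bid in sorted(multiburst_dict.keys())]
--     id_sets=[]
--     previous = 0
--     for i,id in enumerate(ids[0:-1]):
--         current = int(id.split('_')[1])
--         next = int(ids[i+1].split('_')[1])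
--         if not current == (next-1):
--             id_sets.append(ids[previous:(i+1)])
--             previous = i+1
--     id_sets.append(ids[previous::])
--     new_sets=[]
--     for id_set in id_sets:
--         new_dict=dict()
--         for bid in id_set:
--             new_dict[bid] = multiburst_dict[bid]
--         new_sets.append(new_dict)
--     return new_sets
-- ===== SOURCE B (Python) =====
-- def split_vertical_multiburst(multiburst_dict):
--     """
--     Splits a multiburst vertically if it finds a vertical gap in the set.
--     Single accumulating pass over consecutive pairs of the sorted burst IDs,
--     emitting sub-dicts directly, instead of the index-slice-then-rebuild
--     two-phase structure.
--     """
--     ids = sorted(multiburst_dict.keys())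
--     new_sets = []
--     current = {}
--     for prev, nxt in zip(ids, ids[1:]):
--         current[prev] = multiburst_dict[prev]
--         if int(nxt.split('_')[1]) != int(prev.split('_')[1]) + 1:
--             new_sets.append(current)
--             current = {}
--     if ids:
--         current[ids[-1]] = multiburst_dict[ids[-1]]
--     new_sets.append(current)
--     return new_sets
-- ===== Notes on version B (the rewrite author's own statement) =====
-- stated objective: simpler
-- what changed: Replaces A's two-phase structure (index/enumerate loop collecting slice boundaries into id_sets, then a second nested loop rebuilding a dict per slice) with a single accumulating pass over consecutive pairs of the sorted ids that emits the sub-dicts directly at each numbering gap.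
import Mathlib
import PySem

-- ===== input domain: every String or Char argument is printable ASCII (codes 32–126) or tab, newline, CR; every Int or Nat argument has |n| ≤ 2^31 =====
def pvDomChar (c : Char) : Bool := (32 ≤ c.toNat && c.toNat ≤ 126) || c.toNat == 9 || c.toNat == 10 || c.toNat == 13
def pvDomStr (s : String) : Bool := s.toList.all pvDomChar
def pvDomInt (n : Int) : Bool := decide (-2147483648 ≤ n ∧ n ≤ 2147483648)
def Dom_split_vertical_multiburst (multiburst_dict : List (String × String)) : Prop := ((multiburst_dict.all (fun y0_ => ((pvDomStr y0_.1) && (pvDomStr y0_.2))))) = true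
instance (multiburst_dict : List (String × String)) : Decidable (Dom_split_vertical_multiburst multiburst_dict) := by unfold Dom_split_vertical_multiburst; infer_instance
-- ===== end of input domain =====

-- B is a single accumulating pass over the sorted ids (emit a sub-dict at each numbering gap)
-- instead of A's two phases (collect slice boundaries, then rebuild dicts from slices).

-- int(bid.split('_')[1]); total with default 0 — Pre_ excludes the inputs where Python raises here
def pvNum (k : String) : Int :=
  ((PySem.List.pyGet? ((PySem.Str.split? k "_").getD []) 1).bind PySem.Int.ofStr?).getD 0

-- does int(bid.split('_')[1]) return normally in Python?
def pvNumOK (k : String) : Bool :=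
  ((PySem.List.pyGet? ((PySem.Str.split? k "_").getD []) 1).bind PySem.Int.ofStr?).isSome

-- ===== PORT A =====
-- the body of A's first loop (over enumerate(ids[0:-1]))
def pvStepA (ids : List String) (st : List (List String) × Int) (q : Int × String) :
    List (List String) × Int :=
  let current := pvNum q.2
  let next := pvNum ((PySem.List.pyGet? ids (q.1 + 1)).getD "")
  if ¬ (current = next - 1) then
    (st.1 ++ [PySem.List.slice ids (some st.2) (some (q.1 + 1))], q.1 + 1)
  else st

def split_vertical_multiburst (multiburst_dict : List (String × String)) : List (List (String × String)) :=
  let d := PySem.Dict.ofList multiburst_dict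
  let ids := PySem.List.sorted d.keys (fun x => x) false
  let st := (PySem.List.enumerate (PySem.List.slice ids (some 0) (some (-1))) 0).foldl
    (pvStepA ids) ([], 0)
  let id_sets := st.1 ++ [PySem.List.slice ids (some st.2) none]
  id_sets.map (fun id_set =>
    (id_set.foldl (fun nd bid => nd.insert bid (d.getD bid "")) PySem.Dict.empty).items)

-- ===== PORT B =====
-- the body of B's single loop (over zip(ids, ids[1:]))
def pvStepB (d : PySem.Dict String String)
    (st : List (List (String × String)) × PySem.Dict String String)
    (q : String × String) :
    List (List (String × String)) × PySem.Dict String String :=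
  let cur := st.2.insert q.1 (d.getD q.1 "")
  if pvNum q.2 ≠ pvNum q.1 + 1 then (st.1 ++ [cur.items], PySem.Dict.empty) else (st.1, cur)

def split_vertical_multiburst_alt (multiburst_dict : List (String × String)) : List (List (String × String)) :=
  let d := PySem.Dict.ofList multiburst_dict
  let ids := PySem.List.sorted d.keys (fun x => x) false
  let st := (ids.zip (PySem.List.slice ids (some 1) none)).foldl (pvStepB d) ([], PySem.Dict.empty)
  let cur := match ids.getLast? with        -- if ids: current[ids[-1]] = multiburst_dict[ids[-1]]
    | some l => st.2.insert l (d.getD l "")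
    | none => st.2
  st.1 ++ [cur.items]

-- ===== PRECONDITION & SPEC =====
-- Pre_ excludes exactly the inputs where Python A raises (IndexError/ValueError): dicts with ≥ 2
-- keys among which some key's '_'-split has no second field parseable as an int.
def Pre_split_vertical_multiburst (multiburst_dict : List (String × String)) : Prop :=
  (PySem.Dict.ofList multiburst_dict).keys.length ≤ 1 ∨
    ∀ k ∈ (PySem.Dict.ofList multiburst_dict).keys, pvNumOK k = true
instance (multiburst_dict : List (String × String)) : Decidable (Pre_split_vertical_multiburst multiburst_dict) := by unfold Pre_split_vertical_multiburst; infer_instance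

def pvWitness_split_vertical_multiburst : (List (String × String)) :=
  [("b_2", "IW2"), ("b_1", "IW1"), ("b_4", "IW3")]

def Spec_split_vertical_multiburst (multiburst_dict : List (String × String)) (out : List (List (String × String))) : Prop := out = split_vertical_multiburst_alt multiburst_dict
instance (multiburst_dict : List (String × String)) (out : List (List (String × String))) : Decidable (Spec_split_vertical_multiburst multiburst_dict out) := by unfold Spec_split_vertical_multiburst; infer_instance

-- ===== CLAIM (what is proved, stated in full; the proofs are below) =====
def Claim_equal_split_vertical_multiburst : Prop := ∀ (multiburst_dict : List (String × String)), Dom_split_vertical_multiburst multiburst_dict → Pre_split_vertical_multiburst multiburst_dict → Spec_split_vertical_multiburst multiburst_dict (split_vertical_multiburst multiburst_dict)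

-- ===== LEMMAS AND PROOFS =====

-- the dict a group of ids is rebuilt into (shared shape of both ports)
def pvBuild (d : PySem.Dict String String) (g : List String) : PySem.Dict String String :=
  g.foldl (fun nd bid => nd.insert bid (d.getD bid "")) PySem.Dict.empty

-- canonical grouping: extend group g (whose last id has number p) through l, splitting at gaps
def pvGrp (g : List String) (p : Int) : List String → List (List String)
  | [] => [g]
  | a :: t => if pvNum a = p + 1 then pvGrp (g ++ [a]) (pvNum a) t
              else g :: pvGrp [a] (pvNum a) t

theorem pvBuild_append (d : PySem.Dict String String) (g : List String) (a : String) :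
    pvBuild d (g ++ [a]) = (pvBuild d g).insert a (d.getD a "") := by
  simp [pvBuild]

-- B's loop equals the pvGrp grouping mapped through pvBuild
theorem pvB_fold (d : PySem.Dict String String) :
    ∀ (t : List String) (a : String) (res : List (List (String × String))) (g : List String),
      (let st := (List.zip (a :: t) t).foldl (pvStepB d) (res, pvBuild d g);
        st.1 ++ [(st.2.insert ((a :: t).getLast (by simp)) (d.getD ((a :: t).getLast (by simp)) "")).items])
      = res ++ (pvGrp (g ++ [a]) (pvNum a) t).map (fun g => (pvBuild d g).items) := by
  intro t
  induction t with
  | nil =>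
    intro a res g
    simp only [List.zip_nil_right, List.foldl_nil, pvGrp, List.getLast_singleton]
    rw [← pvBuild_append]
    simp
  | cons b t ih =>
    intro a res g
    have hz : List.zip (a :: b :: t) (b :: t) = (a, b) :: List.zip (b :: t) t := rfl
    have hl : (a :: b :: t).getLast (by simp) = (b :: t).getLast (by simp) := by
      simp [List.getLast_cons]
    rw [hz, List.foldl_cons, hl]
    show (let st := (List.zip (b :: t) t).foldl (pvStepB d) (pvStepB d (res, pvBuild d g) (a, b)); _) = _
    by_cases h : pvNum b = pvNum a + 1
    · have hstep : pvStepB d (res, pvBuild d g) (a, b) = (res, pvBuild d (g ++ [a])) := by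
        simp [pvStepB, pvBuild_append, h]
      rw [hstep, ih b res (g ++ [a])]
      simp only [pvGrp]
      rw [if_pos h]
    · have hstep : pvStepB d (res, pvBuild d g) (a, b)
          = (res ++ [(pvBuild d (g ++ [a])).items], pvBuild d []) := by
        simp [pvStepB, pvBuild_append, h]
        rfl
      rw [hstep, ih b (res ++ [(pvBuild d (g ++ [a])).items]) []]
      simp only [pvGrp]
      rw [if_neg h]
      simp

theorem pvEnum_drop (ids : List String) (j : Nat) (hj : j < ids.length - 1) :
    PySem.List.enumerate (ids.dropLast.drop j) (j : Int)
      = ((j : Int), ids.dropLast[j]'(by simp [List.length_dropLast]; omega))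
        :: PySem.List.enumerate (ids.dropLast.drop (j + 1)) ((j : Int) + 1) := by
  have hlen : j < ids.dropLast.length := by simp [List.length_dropLast]; omega
  rw [List.drop_eq_getElem_cons hlen]
  simp [PySem.List.enumerate_cons]

-- A's loop (from pair index j, group boundary p) plus the final slice equals pvGrp
theorem pvA_fold (ids : List String) :
    ∀ (k : Nat) (j p : Nat) (sets : List (List String)),
      (hj : j < ids.length) → p ≤ j → k = ids.length - 1 - j →
      (let st := (PySem.List.enumerate (ids.dropLast.drop j) (j : Int)).foldl
          (pvStepA ids) (sets, (p : Int));
        st.1 ++ [PySem.List.slice ids (some st.2) none])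
      = sets ++ pvGrp ((ids.drop p).take (j + 1 - p))
          (pvNum (ids[j]'hj)) (ids.drop (j + 1)) := by
  intro k
  induction k with
  | zero =>
    intro j p sets hj hp hk
    have hdrop : ids.dropLast.drop j = [] := by
      apply List.drop_eq_nil_of_le; simp [List.length_dropLast]; omega
    have hdrop2 : ids.drop (j + 1) = [] := by
      apply List.drop_eq_nil_of_le; omega
    simp only [hdrop, hdrop2, PySem.List.enumerate_nil, List.foldl_nil, pvGrp]
    rw [PySem.List.slice_from_natCast]
    have : (ids.drop p).take (j + 1 - p) = ids.drop p := by
      apply List.take_of_length_le; simp; omega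
    rw [this]
  | succ k ih =>
    intro j p sets hj hp hk
    have hj1 : j + 1 < ids.length := by omega
    rw [pvEnum_drop ids j (by omega)]
    have hget : ids.dropLast[j]'(by simp [List.length_dropLast]; omega) = ids[j]'hj := by
      simp [List.getElem_dropLast]
    simp only [List.foldl_cons, hget]
    have hnext : ((PySem.List.pyGet? ids ((j : Int) + 1)).getD "") = ids[j+1]'hj1 := by
      have : ((j : Int) + 1) = ((j + 1 : Nat) : Int) := by push_cast; ring
      rw [this, PySem.List.pyGet?_natCast]
      simp [List.getElem?_eq_getElem hj1]
    have hdj : ids.drop (j + 1) = ids[j+1]'hj1 :: ids.drop (j + 2) := by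
      rw [List.drop_eq_getElem_cons hj1]
    by_cases h : pvNum (ids[j]'hj) = pvNum (ids[j+1]'hj1) - 1
    · -- consecutive numbers: no split here
      have hstep : pvStepA ids (sets, (p : Int)) ((j : Int), ids[j]'hj) = (sets, (p : Int)) := by
        simp [pvStepA, hnext, h]
      rw [hstep]
      have hcast : (j : Int) + 1 = ((j + 1 : Nat) : Int) := by push_cast; ring
      rw [hcast, ih (j + 1) p sets hj1 (by omega) (by omega), hdj]
      simp only [pvGrp]
      rw [if_pos (by omega)]
      congr 2
      have h1 : j + 1 + 1 - p = (j + 1 - p) + 1 := by omega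
      rw [h1, List.take_add_one]
      congr 1
      have hlt : j + 1 - p < (ids.drop p).length := by simp; omega
      rw [List.getElem?_eq_getElem hlt]
      simp only [List.getElem_drop]
      have : p + (j + 1 - p) = j + 1 := by omega
      simp [this]
    · -- gap: close the current group
      have hstep : pvStepA ids (sets, (p : Int)) ((j : Int), ids[j]'hj)
          = (sets ++ [PySem.List.slice ids (some (p : Int)) (some ((j : Int) + 1))], (j : Int) + 1) := by
        simp [pvStepA, hnext, h]
      rw [hstep]
      have hcast : (j : Int) + 1 = ((j + 1 : Nat) : Int) := by push_cast; ring
      rw [hcast, ih (j + 1) (j + 1) _ hj1 (by omega) (by omega)]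
      have hslice : PySem.List.slice ids (some (p : Int)) (some ((j + 1 : Nat) : Int))
          = (ids.drop p).take (j + 1 - p) := by
        rw [PySem.List.slice_natCast]
      have ht : (ids.drop (j + 1)).take (j + 1 + 1 - (j + 1)) = [ids[j+1]'hj1] := by
        rw [show j + 1 + 1 - (j + 1) = 1 from by omega, hdj]
        rfl
      rw [hslice, ht, hdj]
      simp only [pvGrp]
      rw [if_neg (by omega), List.append_assoc]
      rfl

-- both ports reduce to the grouping of the sorted ids
theorem pvPorts_eq (md : List (String × String)) :
    split_vertical_multiburst md = split_vertical_multiburst_alt md := by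
  simp only [split_vertical_multiburst, split_vertical_multiburst_alt]
  set d := PySem.Dict.ofList md with hd
  cases hids' : PySem.List.sorted (PySem.Dict.keys d) (fun x => x) false with
  | nil =>
    simp [PySem.List.slice]
  | cons a t =>
    -- B side
    rw [PySem.List.slice_from_one]
    have hlast : (a :: t : List String).getLast? = some ((a :: t).getLast (by simp)) := by
      rw [List.getLast?_eq_some_getLast]
    rw [hlast]
    have hB := pvB_fold d t a [] []
    simp only [List.tail_cons]
    rw [show pvBuild d ([] : List String) = PySem.Dict.empty from rfl] at hB
    rw [hB]
    -- A side
    have hsl : PySem.List.slice (a :: t) (some 0) (some (-1)) = (a :: t).dropLast := by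
      rw [PySem.List.slice_zero_start, PySem.List.slice_to_neg_one]
    have h0 : (0 : Nat) < (a :: t : List String).length := by simp
    have hA := pvA_fold (a :: t) ((a :: t).length - 1 - 0) 0 0 [] h0 (le_refl 0) rfl
    simp only [Nat.cast_zero, List.drop_zero] at hA
    rw [hsl, hA]
    simp
    exact fun g _ => rfl

-- ===== VERDICT (by name: the statement is the Claim_ definition above) =====
theorem split_vertical_multiburst_spec : Claim_equal_split_vertical_multiburst := by
  intro md _ _
  unfold Spec_split_vertical_multiburst
  exact pvPorts_eq md
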